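-- pv_equiv track=rewrite | github.com/algebras-ai/algebras-cli | tests/test_po_handler_msgctxt.py | _has_bug_pattern
-- ===== SOURCE A (Python) =====
-- def _has_bug_pattern(content):
--     """
--     Check if the content has the bug pattern:
--     empty msgid/msgstr followed by another msgid
--     """
--     lines = content.split('\n')
--
--     for i in range(len(lines) - 2):
--         if (lines[i].strip() == 'msgid ""' and
--             lines[i+1].strip() == 'msgstr ""'):
--             # Look for the next non-empty line that starts with msgid
--             for j in range(i+2, len(lines)):
--                 if lines[j].strip():  # Skip empty lines
--                     if lines[j].strip().startswith('msgid'):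
--                         return True
--                     break
--
--     return False
-- ===== SOURCE B (Python) =====
-- def _has_bug_pattern(content):
--     """
--     Check if the content has the bug pattern:
--     empty msgid/msgstr followed by another msgid
--     """
--     prev_empty_msgid = False
--     awaiting_content = False
--     for line in content.split('\n'):
--         s = line.strip()
--         if awaiting_content:
--             if not s:
--                 continue  # skip empty lines after the pair
--             if s.startswith('msgid'):
--                 return True
--             awaiting_content = False
--             prev_empty_msgid = False
--         else:
--             awaiting_content = prev_empty_msgid and s == 'msgstr ""'
--             prev_empty_msgid = s == 'msgid ""'
--     return False
-- ===== Notes on version B (the rewrite author's own statement) =====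
-- stated objective: simpler
-- what changed: Replaced A's nested index loops (outer scan over i with an inner forward scan from i+2 for each candidate pair) by a single linear pass over the lines maintaining two booleans of state (prev_was_empty_msgid, awaiting_content).
import Mathlib
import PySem

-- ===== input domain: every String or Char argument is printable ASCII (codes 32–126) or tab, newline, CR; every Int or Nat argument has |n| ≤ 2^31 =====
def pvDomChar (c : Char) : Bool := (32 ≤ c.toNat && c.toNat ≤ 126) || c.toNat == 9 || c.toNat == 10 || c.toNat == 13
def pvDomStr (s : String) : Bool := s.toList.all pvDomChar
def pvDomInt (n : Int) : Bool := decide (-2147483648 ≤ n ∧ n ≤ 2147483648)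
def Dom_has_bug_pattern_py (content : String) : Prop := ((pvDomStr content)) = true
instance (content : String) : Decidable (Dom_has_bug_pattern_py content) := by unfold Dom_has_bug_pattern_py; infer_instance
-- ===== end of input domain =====

-- B replaces A's nested index loops (for each candidate pair, an inner forward scan) by a
-- single linear pass over the lines with two bits of state; objective: simpler (one pass, no indices).

-- ===== PORT A =====
-- inner loop of A: scan indices j; at the first non-empty stripped line return
-- whether it starts with "msgid" (true = A's `return True`, false = A's `break`/loop end)
def hbpFind (lines : List String) : List Int → Bool
  | [] => false
  | j :: js =>
    let s := PySem.Str.strip (PySem.List.pyGetD lines j "")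
    if s ≠ "" then PySem.Str.startswith s "msgid"
    else hbpFind lines js

-- outer loop of A over i in range(len(lines)-2)
def hbpOuter (lines : List String) : List Int → Bool
  | [] => false
  | i :: is =>
    if (PySem.Str.strip (PySem.List.pyGetD lines i "") == "msgid \"\"")
        && (PySem.Str.strip (PySem.List.pyGetD lines (i + 1) "") == "msgstr \"\"") then
      if hbpFind lines (PySem.List.pyRange (i + 2) (lines.length : Int) 1) then true
      else hbpOuter lines is
    else hbpOuter lines is

def has_bug_pattern_py (content : String) : Bool :=
  let lines := (PySem.Str.split? content "\n").getD []   -- sep "\n" ≠ "", so split? is `some`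
  hbpOuter lines (PySem.List.pyRange 0 ((lines.length : Int) - 2) 1)

-- ===== PORT B =====
-- single pass; state = (prev_empty_msgid, awaiting_content)
def hbpScan : List String → Bool → Bool → Bool
  | [], _, _ => false
  | line :: rest, prev, awaiting =>
    let s := PySem.Str.strip line
    if awaiting then
      if s = "" then hbpScan rest prev true            -- skip empty lines after the pair
      else if PySem.Str.startswith s "msgid" then true
      else hbpScan rest false false
    else
      hbpScan rest (s == "msgid \"\"") (prev && (s == "msgstr \"\""))

def has_bug_pattern_py_alt (content : String) : Bool :=
  hbpScan ((PySem.Str.split? content "\n").getD []) false false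

-- ===== PRECONDITION & SPEC =====
def Spec_has_bug_pattern_py (content : String) (out : Bool) : Prop := out = has_bug_pattern_py_alt content
instance (content : String) (out : Bool) : Decidable (Spec_has_bug_pattern_py content out) := by unfold Spec_has_bug_pattern_py; infer_instance

-- ===== CLAIM =====
def Claim_equal_has_bug_pattern_py : Prop := ∀ (content : String), Dom_has_bug_pattern_py content → Spec_has_bug_pattern_py content (has_bug_pattern_py content)

-- ===== LEMMAS AND PROOFS =====

-- first non-empty stripped line of L starts with "msgid" (false if none)
def hbpResolve : List String → Bool
  | [] => false
  | l :: rest =>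
    let s := PySem.Str.strip l
    if s = "" then hbpResolve rest else PySem.Str.startswith s "msgid"

-- L begins with `msgstr ""` and the bug pattern resolves after it
def hbpPairTail : List String → Bool
  | [] => false
  | b :: r => (PySem.Str.strip b == "msgstr \"\"") && hbpResolve r

-- the bug pattern occurs somewhere in L
def hbpSpec : List String → Bool
  | [] => false
  | a :: rest => ((PySem.Str.strip a == "msgid \"\"") && hbpPairTail rest) || hbpSpec rest

lemma hbpSpec_short (L : List String) (h : L.length ≤ 2) : hbpSpec L = false := by
  match L, h with
  | [], _ => rfl
  | [a], _ => simp [hbpSpec, hbpPairTail]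
  | [a, b], _ => simp [hbpSpec, hbpPairTail, hbpResolve]

lemma hbpFind_eq (lines : List String) (k : Nat) :
    hbpFind lines (PySem.List.pyRange (k : Int) (lines.length : Int) 1)
      = hbpResolve (lines.drop k) := by
  suffices H : ∀ n k, lines.length - k ≤ n →
      hbpFind lines (PySem.List.pyRange (k : Int) (lines.length : Int) 1)
        = hbpResolve (lines.drop k) from H lines.length k (by omega)
  intro n
  induction n with
  | zero =>
    intro k hk
    rw [PySem.List.pyRange_one_eq_nil (by exact_mod_cast (by omega : lines.length ≤ k)),
      List.drop_eq_nil_of_le (by omega)]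
    rfl
  | succ n ih =>
    intro k hk
    by_cases hlt : k < lines.length
    · rw [PySem.List.pyRange_one_cons (by exact_mod_cast hlt),
        List.drop_eq_getElem_cons hlt]
      show (if PySem.Str.strip (PySem.List.pyGetD lines (k : Int) "") ≠ "" then _ else _) = _
      have hg : PySem.List.pyGetD lines (k : Int) "" = lines[k] := by
        simp [List.getElem?_eq_getElem hlt]
      rw [hg]
      have : ((k : Int) + 1) = ((k + 1 : Nat) : Int) := by omega
      rw [this, ih (k + 1) (by omega)]
      by_cases hs : PySem.Str.strip lines[k] = ""
      · simp [hbpResolve, hs]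
      · simp [hbpResolve, hs]
    · rw [PySem.List.pyRange_one_eq_nil (by exact_mod_cast (by omega : lines.length ≤ k)),
        List.drop_eq_nil_of_le (by omega)]
      rfl

lemma hbpOuter_eq (lines : List String) :
    hbpOuter lines (PySem.List.pyRange 0 ((lines.length : Int) - 2) 1) = hbpSpec lines := by
  suffices H : ∀ n k, lines.length - k ≤ n →
      hbpOuter lines (PySem.List.pyRange (k : Int) ((lines.length : Int) - 2) 1)
        = hbpSpec (lines.drop k) by
    have := H lines.length 0 (by omega)
    simpa using this
  intro n
  induction n with
  | zero =>
    intro k hk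
    have hle : lines.length ≤ k := by omega
    rw [PySem.List.pyRange_one_eq_nil (by omega),
      List.drop_eq_nil_of_le hle]
    rfl
  | succ n ih =>
    intro k hk
    by_cases hlt : (k : Int) < (lines.length : Int) - 2
    · have hk2 : k + 2 < lines.length := by omega
      have hk1 : k + 1 < lines.length := by omega
      have hk0 : k < lines.length := by omega
      rw [PySem.List.pyRange_one_cons hlt]
      show (if _ then _ else _) = _
      have hg0 : PySem.List.pyGetD lines (k : Int) "" = lines[k] := by
        simp [List.getElem?_eq_getElem hk0]
      have e1 : ((k : Int) + 1) = ((k + 1 : Nat) : Int) := by omega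
      have e2 : ((k : Int) + 2) = ((k + 2 : Nat) : Int) := by omega
      have hg1 : PySem.List.pyGetD lines ((k + 1 : Nat) : Int) "" = lines[k + 1] := by
        rw [PySem.List.pyGetD_natCast]
        simp [List.getElem?_eq_getElem hk1]
      rw [hg0, e1, hg1, e2, hbpFind_eq lines (k + 2), ih (k + 1) (by omega)]
      rw [List.drop_eq_getElem_cons hk0,
        show hbpSpec (lines[k] :: lines.drop (k + 1))
          = (((PySem.Str.strip lines[k] == "msgid \"\"") && hbpPairTail (lines.drop (k + 1)))
              || hbpSpec (lines.drop (k + 1))) from rfl,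
        List.drop_eq_getElem_cons hk1,
        show hbpPairTail (lines[k + 1] :: lines.drop (k + 2))
          = ((PySem.Str.strip lines[k + 1] == "msgstr \"\"") && hbpResolve (lines.drop (k + 2))) from rfl]
      cases hA : (PySem.Str.strip lines[k] == "msgid \"\"") <;>
        cases hB : (PySem.Str.strip lines[k + 1] == "msgstr \"\"") <;>
        cases hR : hbpResolve (lines.drop (k + 2)) <;> simp
    · have hle : (lines.length : Int) - 2 ≤ (k : Int) := by omega
      rw [PySem.List.pyRange_one_eq_nil hle]
      have : (lines.drop k).length ≤ 2 := by
        have := List.length_drop (l := lines) (i := k)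
        omega
      rw [hbpSpec_short _ this]
      rfl

lemma hbpScan_eq (L : List String) : ∀ (prev awaiting : Bool),
    (awaiting = true → prev = false) →
    hbpScan L prev awaiting
      = ((awaiting && hbpResolve L) || (prev && hbpPairTail L) || hbpSpec L) := by
  induction L with
  | nil => intro prev awaiting _; simp [hbpScan, hbpResolve, hbpPairTail, hbpSpec]
  | cons l rest ih =>
    intro prev awaiting hinv
    have hspec : hbpSpec (l :: rest)
        = (((PySem.Str.strip l == "msgid \"\"") && hbpPairTail rest) || hbpSpec rest) := rfl
    have hpt : hbpPairTail (l :: rest)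
        = ((PySem.Str.strip l == "msgstr \"\"") && hbpResolve rest) := rfl
    cases awaiting with
    | true =>
      have hprev : prev = false := hinv rfl
      subst hprev
      show (if PySem.Str.strip l = "" then _ else _) = _
      by_cases hs : PySem.Str.strip l = ""
      · have hres : hbpResolve (l :: rest) = hbpResolve rest := by
          rw [show hbpResolve (l :: rest)
            = (if PySem.Str.strip l = "" then hbpResolve rest
               else PySem.Str.startswith (PySem.Str.strip l) "msgid") from rfl, if_pos hs]
        have hm : (PySem.Str.strip l == "msgid \"\"") = false := by simp [hs]
        rw [if_pos hs, ih false true (fun _ => rfl), hres, hspec, hm]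
        simp
      · rw [if_neg hs]
        by_cases hw : PySem.Str.startswith (PySem.Str.strip l) "msgid" = true
        · have hres : hbpResolve (l :: rest) = true := by
            rw [show hbpResolve (l :: rest)
              = (if PySem.Str.strip l = "" then hbpResolve rest
                 else PySem.Str.startswith (PySem.Str.strip l) "msgid") from rfl, if_neg hs, hw]
          rw [if_pos hw, hres]
          simp
        · simp only [Bool.not_eq_true] at hw
          have hres : hbpResolve (l :: rest) = false := by
            rw [show hbpResolve (l :: rest)
              = (if PySem.Str.strip l = "" then hbpResolve rest
                 else PySem.Str.startswith (PySem.Str.strip l) "msgid") from rfl, if_neg hs, hw]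
          have hm : (PySem.Str.strip l == "msgid \"\"") = false := by
            by_cases he : PySem.Str.strip l = "msgid \"\""
            · exfalso
              rw [he] at hw
              exact absurd hw (by decide)
            · simp [he]
          rw [if_neg (show ¬(PySem.Str.startswith (PySem.Str.strip l) "msgid" = true) by
              rw [hw]; simp), ih false false (by simp), hres, hspec, hm]
          simp
    | false =>
      show hbpScan rest (PySem.Str.strip l == "msgid \"\"")
            (prev && (PySem.Str.strip l == "msgstr \"\"")) = _
      rw [ih _ _ (by
        intro h
        by_cases he : PySem.Str.strip l = "msgstr \"\""
        · simp [he]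
        · simp [he] at h), hspec, hpt]
      cases prev <;> cases h1 : (PySem.Str.strip l == "msgid \"\"") <;>
        cases h2 : (PySem.Str.strip l == "msgstr \"\"") <;>
        cases h3 : hbpResolve rest <;> simp

-- ===== VERDICT =====
theorem has_bug_pattern_py_spec : Claim_equal_has_bug_pattern_py := by
  intro content _
  unfold Spec_has_bug_pattern_py has_bug_pattern_py has_bug_pattern_py_alt
  rw [hbpOuter_eq, hbpScan_eq _ false false (by simp)]
  simp
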